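-- pv_equiv track=rewrite | github.com/Aylin1030/DiffMS-1 | DiffMS/src/inference/scaffold_hooks.py | update_remaining_formula
-- ===== SOURCE A (Python) =====
-- from typing import Dict, List, Tuple, Optional, Iterable
--
-- class Formula(Dict[str, int]):
--     """分子式表示，例如 {'C': 6, 'H': 12, 'O': 6}"""
--     pass
--
-- def update_remaining_formula(
--     remaining_formula: Formula,
--     added_atoms: List[str]
-- ) -> Formula:
--     """
--     更新剩余化学式：从ΔF中减去新增的原子
--
--     Args:
--         remaining_formula: 当前剩余化学式
--         added_atoms: 新增的原子列表，例如 ['C', 'N', 'O']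
--
--     Returns:
--         updated_formula: 更新后的剩余化学式
--     """
--     updated = Formula(remaining_formula)
--     for atom in added_atoms:
--         if atom in updated:
--             updated[atom] -= 1
--             if updated[atom] < 0:
--                 # 超出限制，返回None表示非法
--                 return None
--     return updated
-- ===== SOURCE B (Python) =====
-- from typing import Dict, List, Optional
--
-- class Formula(Dict[str, int]):
--     """分子式表示，例如 {'C': 6, 'H': 12, 'O': 6}"""
--     pass
--
-- def update_remaining_formula(
--     remaining_formula: Formula,
--     added_atoms: List[str]
-- ) -> Formula:
--     # Aggregate first: how many of each relevant atom were added, then one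
--     # subtraction per distinct atom instead of one decrement per occurrence.
--     need = {}
--     for a in added_atoms:
--         if a in remaining_formula:
--             need[a] = need.get(a, 0) + 1
--     updated = Formula(remaining_formula)
--     for atom, cnt in need.items():
--         new_val = updated[atom] - cnt
--         if new_val < 0:
--             return None
--         updated[atom] = new_val
--     return updated
-- ===== Notes on version B (the rewrite author's own statement) =====
-- stated objective: alternative
-- what changed: B first aggregates the added atoms into a per-atom count dict (only for atoms present in the formula) and then does one subtraction-and-check per distinct atom, instead of A's one decrement-and-check per occurrence.
import Mathlib
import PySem

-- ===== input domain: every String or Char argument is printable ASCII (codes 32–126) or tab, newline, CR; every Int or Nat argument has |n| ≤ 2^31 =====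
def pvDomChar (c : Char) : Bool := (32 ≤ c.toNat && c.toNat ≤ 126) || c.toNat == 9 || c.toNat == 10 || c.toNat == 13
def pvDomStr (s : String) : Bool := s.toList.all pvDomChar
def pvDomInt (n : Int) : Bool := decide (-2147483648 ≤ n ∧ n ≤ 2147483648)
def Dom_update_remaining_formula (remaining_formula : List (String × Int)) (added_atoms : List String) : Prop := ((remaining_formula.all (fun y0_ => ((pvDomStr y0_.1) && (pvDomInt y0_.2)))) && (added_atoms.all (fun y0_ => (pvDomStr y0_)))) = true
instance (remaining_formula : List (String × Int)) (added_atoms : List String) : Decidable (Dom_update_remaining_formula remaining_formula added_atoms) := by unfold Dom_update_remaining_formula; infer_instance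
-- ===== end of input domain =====

-- B aggregates the added atoms into per-atom counts and subtracts once per distinct atom,
-- instead of A's decrement-and-check per occurrence; same return value (objective: alternative).

-- ===== PORT A =====
-- 'for atom in added_atoms: if atom in updated: updated[atom] -= 1; if updated[atom] < 0: return None'
def urfLoopA (atoms : List String) (u : PySem.Dict String Int) : Option (PySem.Dict String Int) :=
  match atoms with
  | [] => some u
  | a :: rest =>
    match u.get? a with
    | none => urfLoopA rest u
    | some v => if v - 1 < 0 then none else urfLoopA rest (u.insert a (v - 1))

def update_remaining_formula (remaining_formula : List (String × Int)) (added_atoms : List String) : Option (List (String × Int)) :=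
  -- updated = Formula(remaining_formula)
  (urfLoopA added_atoms (PySem.Dict.ofList remaining_formula)).map (·.items)

-- ===== PORT B =====
-- 'for atom, cnt in need.items(): new_val = updated[atom] - cnt; if new_val < 0: return None; updated[atom] = new_val'
-- (atom is always a key of updated here, so the getD default 0 is never used)
def urfLoopB (its : List (String × Int)) (u : PySem.Dict String Int) : Option (PySem.Dict String Int) :=
  match its with
  | [] => some u
  | (atom, cnt) :: rest =>
    let newVal := u.getD atom 0 - cnt
    if newVal < 0 then none else urfLoopB rest (u.insert atom newVal)

def update_remaining_formula_alt (remaining_formula : List (String × Int)) (added_atoms : List String) : Option (List (String × Int)) :=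
  let orig := PySem.Dict.ofList remaining_formula
  -- need = {}; for a in added_atoms: if a in remaining_formula: need[a] = need.get(a, 0) + 1
  let need := added_atoms.foldl
    (fun d a => if orig.contains a then d.insert a (d.getD a 0 + 1) else d) PySem.Dict.empty
  (urfLoopB need.items orig).map (·.items)

-- ===== PRECONDITION & SPEC =====
def Spec_update_remaining_formula (remaining_formula : List (String × Int)) (added_atoms : List String) (out : Option (List (String × Int))) : Prop := out = update_remaining_formula_alt remaining_formula added_atoms
instance (remaining_formula : List (String × Int)) (added_atoms : List String) (out : Option (List (String × Int))) : Decidable (Spec_update_remaining_formula remaining_formula added_atoms out) := by unfold Spec_update_remaining_formula; infer_instance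

-- ===== CLAIM (what is proved, stated in full; the proofs are below) =====
def Claim_equal_update_remaining_formula : Prop := ∀ (remaining_formula : List (String × Int)) (added_atoms : List String), Dom_update_remaining_formula remaining_formula added_atoms → Spec_update_remaining_formula remaining_formula added_atoms (update_remaining_formula remaining_formula added_atoms)

-- ===== LEMMAS AND PROOFS =====

-- canonical value both loops compute: fail iff some present atom is over-consumed,
-- otherwise every entry loses one unit per occurrence (order of processing is irrelevant)
lemma loopA_canon (atoms : List String) (u : PySem.Dict String Int) (hn : u.keys.Nodup) :
    urfLoopA atoms u =
      if ∀ k ∈ u.keys, k ∈ atoms → (atoms.count k : Int) ≤ u.getD k 0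
      then some (PySem.Dict.mk (u.items.map (fun p => (p.1, p.2 - (atoms.count p.1 : Int)))))
      else none := by
  induction atoms generalizing u with
  | nil => simp [urfLoopA]
  | cons a rest ih =>
    rcases hg : u.get? a with _ | v
    · have hna : a ∉ u.keys := (PySem.Dict.get?_eq_none_iff_not_mem_keys u a).mp hg
      unfold urfLoopA
      rw [hg, ih u hn]
      have hiff : (∀ k ∈ u.keys, k ∈ rest → ((rest.count k : Int) ≤ u.getD k 0)) ↔
          (∀ k ∈ u.keys, k ∈ a :: rest → (((a :: rest).count k : Int) ≤ u.getD k 0)) := by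
        constructor
        · intro h k hk hm
          have hak : (a == k) = false := beq_eq_false_iff_ne.mpr (fun e => hna (e ▸ hk))
          have hm' : k ∈ rest := by
            rcases List.mem_cons.mp hm with e | e
            · exact absurd hak (by simp [e])
            · exact e
          have := h k hk hm'
          simp [List.count_cons, hak]
          exact this
        · intro h k hk hm
          have hak : (a == k) = false := beq_eq_false_iff_ne.mpr (fun e => hna (e ▸ hk))
          have := h k hk (List.mem_cons_of_mem _ hm)
          simpa [List.count_cons, hak] using this
      have hmap : (u.items.map (fun p => (p.1, p.2 - (rest.count p.1 : Int)))) =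
          (u.items.map (fun p => (p.1, p.2 - ((a :: rest).count p.1 : Int)))) := by
        apply List.map_congr_left
        intro p hp
        have hak : (a == p.1) = false := beq_eq_false_iff_ne.mpr
          (fun e => hna (e ▸ PySem.Dict.mem_keys_of_mem_items u hp))
        simp [List.count_cons, hak]
      rw [hmap, if_congr hiff rfl rfl]
    · have hmem : a ∈ u.keys := by
        by_contra h
        rw [(PySem.Dict.get?_eq_none_iff_not_mem_keys u a).mpr h] at hg
        cases hg
      have hgd : u.getD a 0 = v := PySem.Dict.getD_of_get?_eq_some u 0 hg
      have hcont : u.contains a = true := (PySem.Dict.contains_iff_mem_keys u a).mpr hmem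
      unfold urfLoopA
      rw [hg]
      dsimp only
      by_cases hv : v - 1 < 0
      · rw [if_pos hv, if_neg]
        intro h
        have := h a hmem (List.mem_cons_self)
        rw [hgd, List.count_cons_self] at this
        omega
      · rw [if_neg hv]
        have hkeys : (u.insert a (v - 1)).keys = u.keys :=
          PySem.Dict.keys_insert_of_contains u (v - 1) hcont
        have hn' : (u.insert a (v - 1)).keys.Nodup := hkeys ▸ hn
        rw [ih _ hn']
        have hiff : (∀ k ∈ (u.insert a (v - 1)).keys, k ∈ rest →
              ((rest.count k : Int) ≤ (u.insert a (v - 1)).getD k 0)) ↔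
            (∀ k ∈ u.keys, k ∈ a :: rest → (((a :: rest).count k : Int) ≤ u.getD k 0)) := by
          rw [hkeys]
          constructor
          · intro h k hk hm
            by_cases hka : k = a
            · subst hka
              rw [hgd, List.count_cons_self]
              by_cases hr : k ∈ rest
              · have := h k hk hr
                rw [PySem.Dict.getD_insert, if_pos rfl] at this
                omega
              · rw [List.count_eq_zero.mpr hr]
                omega
            · have hm' : k ∈ rest := by
                rcases List.mem_cons.mp hm with e | e
                · exact absurd e hka
                · exact e
              have := h k hk hm'
              rw [PySem.Dict.getD_insert, if_neg hka] at this
              have hak : (a == k) = false := beq_eq_false_iff_ne.mpr (Ne.symm hka)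
              simp [List.count_cons, hak]
              exact this
          · intro h k hk hm
            by_cases hka : k = a
            · subst hka
              have := h k hk (List.mem_cons_self)
              rw [hgd, List.count_cons_self] at this
              rw [PySem.Dict.getD_insert, if_pos rfl]
              omega
            · have := h k hk (List.mem_cons_of_mem _ hm)
              have hak : (a == k) = false := beq_eq_false_iff_ne.mpr (Ne.symm hka)
              rw [PySem.Dict.getD_insert, if_neg hka]
              simpa [List.count_cons, hak] using this
        have hmap : ((u.insert a (v - 1)).items.map (fun p => (p.1, p.2 - (rest.count p.1 : Int)))) =
            (u.items.map (fun p => (p.1, p.2 - ((a :: rest).count p.1 : Int)))) := by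
          rw [PySem.Dict.items_insert_of_contains u (v - 1) hcont, List.map_map]
          apply List.map_congr_left
          intro p hp
          by_cases hka : p.1 = a
          · have hpv : p.2 = v := by
              have h2 : u.get? p.1 = some p.2 :=
                PySem.Dict.get?_of_mem_items u (by simpa using hp) hn
              rw [hka] at h2
              rw [hg] at h2
              exact (Option.some.inj h2).symm
            have hak : (p.1 == a) = true := beq_iff_eq.mpr hka
            simp only [Function.comp_apply, hak, if_pos]
            rw [hka, hpv, List.count_cons_self]
            simp
            ring
          · have hak : (p.1 == a) = false := beq_eq_false_iff_ne.mpr hka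
            have hak' : (a == p.1) = false := beq_eq_false_iff_ne.mpr (Ne.symm hka)
            simp only [Function.comp_apply, hak]
            simp [List.count_cons, hak']
        rw [hmap, if_congr hiff rfl rfl]

lemma loopB_canon (L ks : List String) (u : PySem.Dict String Int)
    (hn : u.keys.Nodup) (hks : ks.Nodup) (hsub : ∀ k ∈ ks, k ∈ u.keys) :
    urfLoopB (ks.map (fun k => (k, (L.count k : Int)))) u =
      if ∀ k ∈ ks, (L.count k : Int) ≤ u.getD k 0
      then some (PySem.Dict.mk (u.items.map
        (fun p => (p.1, if p.1 ∈ ks then p.2 - (L.count p.1 : Int) else p.2))))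
      else none := by
  induction ks generalizing u with
  | nil => simp [urfLoopB]
  | cons a ks ih =>
    have hmem : a ∈ u.keys := hsub a (List.mem_cons_self)
    have hcont : u.contains a = true := (PySem.Dict.contains_iff_mem_keys u a).mpr hmem
    have hna : a ∉ ks := (List.nodup_cons.mp hks).1
    have hks' : ks.Nodup := (List.nodup_cons.mp hks).2
    rw [List.map_cons]
    unfold urfLoopB
    dsimp only
    by_cases hneg : u.getD a 0 - (L.count a : Int) < 0
    · rw [if_pos hneg, if_neg]
      intro h
      have := h a (List.mem_cons_self)
      omega
    · rw [if_neg hneg]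
      set w : Int := u.getD a 0 - (L.count a : Int) with hw
      have hkeys : (u.insert a w).keys = u.keys := PySem.Dict.keys_insert_of_contains u w hcont
      have hn' : (u.insert a w).keys.Nodup := hkeys ▸ hn
      have hsub' : ∀ k ∈ ks, k ∈ (u.insert a w).keys := by
        rw [hkeys]; exact fun k hk => hsub k (List.mem_cons_of_mem _ hk)
      rw [ih (u.insert a w) hn' hks' hsub']
      have hiff : (∀ k ∈ ks, (L.count k : Int) ≤ (u.insert a w).getD k 0) ↔
          (∀ k ∈ a :: ks, (L.count k : Int) ≤ u.getD k 0) := by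
        constructor
        · intro h k hk
          rcases List.mem_cons.mp hk with e | e
          · subst e; omega
          · have := h k e
            rw [PySem.Dict.getD_insert, if_neg (show k ≠ a from fun hh => hna (hh ▸ e))] at this
            exact this
        · intro h k hk
          have hka : k ≠ a := fun e => hna (e ▸ hk)
          have := h k (List.mem_cons_of_mem _ hk)
          rw [PySem.Dict.getD_insert, if_neg hka]
          exact this
      have hmap : ((u.insert a w).items.map
            (fun p => (p.1, if p.1 ∈ ks then p.2 - (L.count p.1 : Int) else p.2))) =
          (u.items.map
            (fun p => (p.1, if p.1 ∈ a :: ks then p.2 - (L.count p.1 : Int) else p.2))) := by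
        rw [PySem.Dict.items_insert_of_contains u w hcont, List.map_map]
        apply List.map_congr_left
        intro p hp
        by_cases hka : p.1 = a
        · have hpv : p.2 = u.getD a 0 := by
            have h2 : u.get? p.1 = some p.2 :=
              PySem.Dict.get?_of_mem_items u (by simpa using hp) hn
            rw [hka] at h2
            exact (PySem.Dict.getD_of_get?_eq_some u 0 h2).symm
          have hak : (p.1 == a) = true := beq_iff_eq.mpr hka
          simp only [Function.comp_apply, hak, if_pos, List.mem_cons]
          simp [hka, hpv, hna]
          exact hw
        · have hak : (p.1 == a) = false := beq_eq_false_iff_ne.mpr hka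
          simp only [Function.comp_apply, hak, List.mem_cons]
          simp [hka]
      rw [hmap, if_congr hiff rfl rfl]

-- ===== VERDICT (by name: the statement is the Claim_ definition above) =====
theorem update_remaining_formula_spec : Claim_equal_update_remaining_formula := by
  intro remaining_formula added_atoms _
  unfold Spec_update_remaining_formula
  unfold update_remaining_formula update_remaining_formula_alt
  set u0 := PySem.Dict.ofList remaining_formula with hu0
  have hn : u0.keys.Nodup := PySem.Dict.nodup_keys_ofList remaining_formula
  set L := added_atoms.filter (fun a => u0.contains a) with hL
  have hmemL : ∀ k, k ∈ L ↔ (k ∈ added_atoms ∧ u0.contains k = true) := by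
    intro k; rw [hL, List.mem_filter]
  have hcountL : ∀ k, u0.contains k = true → L.count k = added_atoms.count k := by
    intro k hk; rw [hL]; exact List.count_filter hk
  have hneed : added_atoms.foldl
      (fun d a => if u0.contains a then d.insert a (d.getD a 0 + 1) else d) PySem.Dict.empty
      = PySem.Dict.counter L := by
    rw [hL, ← PySem.Dict.foldl_insert_getD_add_one_eq_counter, List.foldl_filter]
  dsimp only
  rw [hneed, PySem.Dict.items_counter]
  have hsub : ∀ k ∈ PySem.Set.ofList L, k ∈ u0.keys := by
    intro k hk
    exact (PySem.Dict.contains_iff_mem_keys u0 k).mp ((hmemL k).mp ((PySem.Set.mem_ofList L k).mp hk)).2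
  rw [loopA_canon added_atoms u0 hn,
      loopB_canon L (PySem.Set.ofList L) u0 hn (PySem.Set.nodup_ofList L) hsub]
  have hiff : (∀ k ∈ u0.keys, k ∈ added_atoms → ((added_atoms.count k : Int) ≤ u0.getD k 0)) ↔
      (∀ k ∈ PySem.Set.ofList L, ((L.count k : Int) ≤ u0.getD k 0)) := by
    constructor
    · intro h k hk
      have hkL : k ∈ L := (PySem.Set.mem_ofList L k).mp hk
      have hc := (hmemL k).mp hkL
      rw [hcountL k hc.2]
      exact h k ((PySem.Dict.contains_iff_mem_keys u0 k).mp hc.2) hc.1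
    · intro h k hk hm
      have hc : u0.contains k = true := (PySem.Dict.contains_iff_mem_keys u0 k).mpr hk
      have := h k ((PySem.Set.mem_ofList L k).mpr ((hmemL k).mpr ⟨hm, hc⟩))
      rw [hcountL k hc] at this
      exact this
  have hmap : (u0.items.map (fun p => (p.1, p.2 - (added_atoms.count p.1 : Int)))) =
      (u0.items.map (fun p =>
        (p.1, if p.1 ∈ PySem.Set.ofList L then p.2 - (L.count p.1 : Int) else p.2))) := by
    apply List.map_congr_left
    intro p hp
    have hc : u0.contains p.1 = true :=
      (PySem.Dict.contains_iff_mem_keys u0 p.1).mpr (PySem.Dict.mem_keys_of_mem_items u0 hp)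
    by_cases hm : p.1 ∈ added_atoms
    · rw [if_pos ((PySem.Set.mem_ofList L p.1).mpr ((hmemL p.1).mpr ⟨hm, hc⟩)), hcountL p.1 hc]
    · rw [if_neg (fun hk => hm ((hmemL p.1).mp ((PySem.Set.mem_ofList L p.1).mp hk)).1)]
      rw [List.count_eq_zero.mpr hm]
      simp
  rw [hmap, if_congr hiff rfl rfl]
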